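-- pv_equiv track=rewrite | github.com/NNargesNN/GeoToken | s2_token_utils.py | ungroup_s2_tokens
-- ===== SOURCE A (Python) =====
-- def ungroup_s2_tokens(grouped_tokens, group_size=5):
--     """
--     Reconstruct the full token sequence from the grouped token sequence.
--     The first token is unchanged; each subsequent grouped token is converted back into group_size tokens.
--     """
--     full = [grouped_tokens[0]]
--     for val in grouped_tokens[1:]:
--         group = []
--         for i in range(group_size):
--             digit = (val // (4 ** (group_size - i - 1))) % 4
--             group.append(digit)
--         full.extend(group)
--     return full
-- ===== SOURCE B (Python) =====
-- def ungroup_s2_tokens(grouped_tokens, group_size=5):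
--     """
--     Reconstruct the full token sequence from the grouped token sequence.
--     The first token is unchanged; each subsequent grouped token is expanded
--     into group_size base-4 digits by repeated division (divmod), then reversed.
--     """
--     full = [grouped_tokens[0]]
--     for val in grouped_tokens[1:]:
--         rem = val
--         digits = []
--         for _ in range(group_size):
--             rem, d = divmod(rem, 4)
--             digits.append(d)
--         digits.reverse()
--         full.extend(digits)
--     return full
-- ===== Notes on version B (the rewrite author's own statement) =====
-- stated objective: alternative
-- what changed: Each group's digits are produced least-significant-first by chained divmod (repeated division by 4) and then reversed, instead of computing each digit independently by floor-dividing by a freshly computed power 4**(group_size-i-1).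
import Mathlib
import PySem

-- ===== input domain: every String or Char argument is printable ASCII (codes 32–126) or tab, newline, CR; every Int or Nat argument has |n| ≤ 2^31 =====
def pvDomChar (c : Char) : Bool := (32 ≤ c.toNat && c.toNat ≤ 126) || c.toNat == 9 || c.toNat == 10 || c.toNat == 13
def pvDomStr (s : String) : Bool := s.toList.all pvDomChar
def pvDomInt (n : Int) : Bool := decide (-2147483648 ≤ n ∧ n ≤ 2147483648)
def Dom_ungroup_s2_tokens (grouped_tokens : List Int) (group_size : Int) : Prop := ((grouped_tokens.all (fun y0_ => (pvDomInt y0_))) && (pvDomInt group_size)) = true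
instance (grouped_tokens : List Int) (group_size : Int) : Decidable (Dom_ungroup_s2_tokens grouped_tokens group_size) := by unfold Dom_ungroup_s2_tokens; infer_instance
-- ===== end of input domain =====

-- B expands each group by chained divmod (LSB-first, then reversed) instead of A's
-- independent power-of-4 digit extraction; objective: alternative decomposition (no fresh powers).
-- Pre_ excludes the empty list, on which Python A raises IndexError indexing the first element.


-- ===== PORT A =====
-- digit = (val // (4 ** (group_size - i - 1))) % 4 ; exponent is ≥ 0 whenever i ∈ range(group_size)
def ungroup_s2_tokens (grouped_tokens : List Int) (group_size : Int) : List Int :=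
  match grouped_tokens with
  | [] => []   -- Python raises IndexError here; excluded by Pre_
  | first :: rest =>
    rest.foldl (fun full val =>
      full ++ (PySem.List.pyRange 0 group_size 1).foldl (fun group i =>
        group ++ [PySem.Int.mod (PySem.Int.floordiv val (4 ^ (group_size - i - 1).toNat)) 4]) []) [first]

-- ===== PORT B =====
-- rem, d = divmod(rem, 4) repeated group_size times; digits reversed then extended onto full
def pvAltGroup (val : Int) (group_size : Int) : List Int :=
  let st := (PySem.List.pyRange 0 group_size 1).foldl
      (fun (st : Int × List Int) _ =>
        (PySem.Int.floordiv st.1 4, st.2 ++ [PySem.Int.mod st.1 4])) (val, [])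
  st.2.reverse

def ungroup_s2_tokens_alt (grouped_tokens : List Int) (group_size : Int) : List Int :=
  match grouped_tokens with
  | [] => []   -- Python raises IndexError here; excluded by Pre_
  | first :: rest =>
    rest.foldl (fun full val => full ++ pvAltGroup val group_size) [first]

-- ===== PRECONDITION & SPEC =====
-- Pre_ excludes exactly the empty list, where both Pythons raise IndexError taking the first element.
def Pre_ungroup_s2_tokens (grouped_tokens : List Int) (group_size : Int) : Prop := grouped_tokens ≠ []
instance (grouped_tokens : List Int) (group_size : Int) : Decidable (Pre_ungroup_s2_tokens grouped_tokens group_size) := by unfold Pre_ungroup_s2_tokens; infer_instance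
def pvWitness_ungroup_s2_tokens : List Int × Int := ([7, 123, -5], 3)

def Spec_ungroup_s2_tokens (grouped_tokens : List Int) (group_size : Int) (out : List Int) : Prop := out = ungroup_s2_tokens_alt grouped_tokens group_size
instance (grouped_tokens : List Int) (group_size : Int) (out : List Int) : Decidable (Spec_ungroup_s2_tokens grouped_tokens group_size out) := by unfold Spec_ungroup_s2_tokens; infer_instance

-- ===== CLAIM (what is proved, stated in full; the proofs are below) =====
def Claim_equal_ungroup_s2_tokens : Prop := ∀ (grouped_tokens : List Int) (group_size : Int), Dom_ungroup_s2_tokens grouped_tokens group_size → Pre_ungroup_s2_tokens grouped_tokens group_size → Spec_ungroup_s2_tokens grouped_tokens group_size (ungroup_s2_tokens grouped_tokens group_size)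

-- ===== LEMMAS AND PROOFS =====

-- B's inner loop: fold over any list of length n, starting at (val, acc),
-- yields (val // 4^n, acc ++ LSB-first digits of val).
theorem pvAlt_fold_char (l : List Int) (val : Int) (acc : List Int) :
    l.foldl (fun (st : Int × List Int) _ =>
        (PySem.Int.floordiv st.1 4, st.2 ++ [PySem.Int.mod st.1 4])) (val, acc)
      = (val / (4 : Int) ^ l.length,
         acc ++ (List.range l.length).map (fun j => val / (4 : Int) ^ j % 4)) := by
  induction l generalizing val acc with
  | nil => simp
  | cons x xs ih =>
    simp only [List.foldl_cons, List.length_cons]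
    rw [ih]
    rw [PySem.Int.floordiv_eq_ediv_of_pos (by norm_num),
        PySem.Int.mod_eq_emod_of_pos (by norm_num)]
    simp only [Prod.mk.injEq]
    constructor
    · rw [Int.ediv_ediv_of_nonneg (by norm_num)]
      ring_nf
    · rw [List.range_succ_eq_map]
      simp only [List.map_cons, List.map_map, List.append_assoc, List.singleton_append,
        pow_zero, Int.ediv_one]
      congr 1
      congr 1
      apply List.map_congr_left
      intro j _
      simp only [Function.comp]
      rw [Int.ediv_ediv_of_nonneg (by norm_num), ← pow_succ']

-- A's group for one value equals B's group for one value.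
theorem pvGroup_eq (val group_size : Int) :
    (PySem.List.pyRange 0 group_size 1).foldl (fun group i =>
        group ++ [PySem.Int.mod (PySem.Int.floordiv val (4 ^ (group_size - i - 1).toNat)) 4]) []
      = pvAltGroup val group_size := by
  unfold pvAltGroup
  rw [PySem.List.foldl_append_singleton_eq_map, pvAlt_fold_char]
  simp only [List.nil_append, PySem.List.pyRange_one, List.map_map]
  set n : Nat := (group_size - 0).toNat with hn
  apply List.ext_getElem
  · simp
  · intro i h1 h2
    simp only [List.getElem_map, List.getElem_range, List.getElem_reverse, List.length_map,
      List.length_range, Function.comp]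
    have hi : i < n := by simpa using h1
    rw [PySem.Int.floordiv_eq_ediv_of_pos (by positivity),
        PySem.Int.mod_eq_emod_of_pos (by norm_num)]
    have : (group_size - (0 + (i : Int)) - 1).toNat = n - 1 - i := by omega
    rw [this]

-- ===== VERDICT (by name: the statement is the Claim_ definition above) =====
theorem ungroup_s2_tokens_spec : Claim_equal_ungroup_s2_tokens := by
  intro grouped_tokens group_size _ hpre
  unfold Spec_ungroup_s2_tokens ungroup_s2_tokens ungroup_s2_tokens_alt
  cases grouped_tokens with
  | nil => exact absurd rfl hpre
  | cons first rest =>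
    simp only
    congr 1
    funext full val
    rw [pvGroup_eq]
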